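-- pv_equiv track=rewrite | github.com/moranabadie/SmartHome | Threads/Weather/weather.py | auxWeather
-- ===== SOURCE A (Python) =====
-- def auxWeather(l):
--
--     for i in l:
--         if i == "Thunderstorm":
--             return "Il y aura de l'orage"
--     for i in l:
--         if i == "Snow":
--             return "Il y aura de la neige"
--     for i in l:
--         if i == "Rain":
--             return "Il y aura de la pluie"
--     for i in l:
--         if i == "Drizzle":
--             return "Il y aura de la brume"
--
--     for i in l:
--         if i == "Clouds":
--             return "Il y aura des nuages"
--     for i in l:
--         if i == "Clear":
--             return "Il fera beau"
--     return ""
-- ===== SOURCE B (Python) =====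
-- RANK = {"Thunderstorm": 0, "Snow": 1, "Rain": 2, "Drizzle": 3, "Clouds": 4, "Clear": 5}
-- MESSAGES = ["Il y aura de l'orage", "Il y aura de la neige", "Il y aura de la pluie",
--             "Il y aura de la brume", "Il y aura des nuages", "Il fera beau", ""]
--
-- def auxWeather(l):
--     best = 6
--     for i in l:
--         r = RANK.get(i, 6)
--         if r < best:
--             best = r
--     return MESSAGES[best]
-- ===== Notes on version B (the rewrite author's own statement) =====
-- stated objective: alternative
-- what changed: Instead of six sequential scans of the list (or membership tests per condition), B makes a single pass over the input maintaining the minimum numeric priority rank seen, then indexes a message table by that rank.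
import Mathlib
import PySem

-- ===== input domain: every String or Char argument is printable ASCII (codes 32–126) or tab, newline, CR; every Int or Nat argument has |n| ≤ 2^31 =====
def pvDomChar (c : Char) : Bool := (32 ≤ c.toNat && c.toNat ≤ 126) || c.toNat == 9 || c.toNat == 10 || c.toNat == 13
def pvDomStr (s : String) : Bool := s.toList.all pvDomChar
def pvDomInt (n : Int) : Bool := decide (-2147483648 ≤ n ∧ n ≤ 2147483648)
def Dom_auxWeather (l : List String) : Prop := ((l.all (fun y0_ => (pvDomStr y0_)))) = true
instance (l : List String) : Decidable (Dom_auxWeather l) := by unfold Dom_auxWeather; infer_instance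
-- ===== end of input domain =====

-- B replaces A's six sequential scans with a single pass over the input that keeps the
-- minimum numeric priority rank, then indexes a message table (objective: alternative).

-- ===== PORT A =====
-- one helper per Python 'for i in l: if i == t: return msg' loop (some msg = early return)
def auxWeatherScan (l : List String) (t msg : String) : Option String :=
  match l with
  | [] => none
  | i :: rest => if i = t then some msg else auxWeatherScan rest t msg

def auxWeather (l : List String) : String :=
  match auxWeatherScan l "Thunderstorm" "Il y aura de l'orage" with
  | some r => r
  | none =>
    match auxWeatherScan l "Snow" "Il y aura de la neige" with
    | some r => r
    | none =>
      match auxWeatherScan l "Rain" "Il y aura de la pluie" with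
      | some r => r
      | none =>
        match auxWeatherScan l "Drizzle" "Il y aura de la brume" with
        | some r => r
        | none =>
          match auxWeatherScan l "Clouds" "Il y aura des nuages" with
          | some r => r
          | none =>
            match auxWeatherScan l "Clear" "Il fera beau" with
            | some r => r
            | none => ""

-- ===== PORT B =====
-- RANK.get(i, 6) from Source B
def auxWeatherRank (s : String) : Nat :=
  if s = "Thunderstorm" then 0
  else if s = "Snow" then 1
  else if s = "Rain" then 2
  else if s = "Drizzle" then 3
  else if s = "Clouds" then 4
  else if s = "Clear" then 5
  else 6

-- MESSAGES from Source B
def auxWeatherMsgs : List String :=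
  ["Il y aura de l'orage", "Il y aura de la neige", "Il y aura de la pluie",
   "Il y aura de la brume", "Il y aura des nuages", "Il fera beau", ""]

-- 'best = 6; for i in l: r = RANK.get(i,6); if r < best: best = r'
def auxWeather_alt (l : List String) : String :=
  auxWeatherMsgs.getD
    (l.foldl (fun best i =>
      let r := auxWeatherRank i
      if r < best then r else best) 6) ""

-- ===== PRECONDITION & SPEC =====
def Spec_auxWeather (l : List String) (out : String) : Prop := out = auxWeather_alt l
instance (l : List String) (out : String) : Decidable (Spec_auxWeather l out) := by unfold Spec_auxWeather; infer_instance

-- ===== CLAIM (what is proved, stated in full; the proofs are below) =====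
def Claim_equal_auxWeather : Prop := ∀ (l : List String), Dom_auxWeather l → Spec_auxWeather l (auxWeather l)

-- ===== LEMMAS AND PROOFS =====
theorem auxWeatherScan_eq (l : List String) (t msg : String) :
    auxWeatherScan l t msg = if t ∈ l then some msg else none := by
  induction l with
  | nil => simp [auxWeatherScan]
  | cons i rest ih =>
    simp only [auxWeatherScan, ih, List.mem_cons]
    by_cases h : i = t
    · simp [h]
    · have h' : ¬ t = i := fun hh => h hh.symm
      by_cases h2 : t ∈ rest <;> simp [h, h', h2]

-- the step function of B's fold is just min
theorem auxWeatherStep_min (b : Nat) (i : String) :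
    (let r := auxWeatherRank i; if r < b then r else b) = min (auxWeatherRank i) b := by
  simp only []
  split_ifs <;> omega

-- the fold computes min over the list, with the accumulator factored out
theorem foldl_min_shift (l : List String) (a b : Nat) :
    l.foldl (fun best i => min (auxWeatherRank i) best) (min a b)
      = min a (l.foldl (fun best i => min (auxWeatherRank i) best) b) := by
  induction l generalizing a b with
  | nil => simp
  | cons i rest ih =>
    simp only [List.foldl]
    rw [show min (auxWeatherRank i) (min a b) = min a (min (auxWeatherRank i) b) by omega, ih]

-- characterisation of the minimum rank by memberships
def auxWeatherBest (l : List String) : Nat :=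
  if "Thunderstorm" ∈ l then 0
  else if "Snow" ∈ l then 1
  else if "Rain" ∈ l then 2
  else if "Drizzle" ∈ l then 3
  else if "Clouds" ∈ l then 4
  else if "Clear" ∈ l then 5
  else 6

theorem auxWeatherBest_le (l : List String) : auxWeatherBest l ≤ 6 := by
  unfold auxWeatherBest; split_ifs <;> omega

theorem best_cons (i : String) (rest : List String) :
    auxWeatherBest (i :: rest) = min (auxWeatherRank i) (auxWeatherBest rest) := by
  have hb := auxWeatherBest_le rest
  by_cases h1 : i = "Thunderstorm"
  · subst h1; simp [auxWeatherBest, auxWeatherRank]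
  by_cases h2 : i = "Snow"
  · subst h2; simp only [auxWeatherBest, auxWeatherRank, List.mem_cons]
    simp only [String.reduceEq, false_or, if_false, true_or, if_true]
    split_ifs <;> omega
  by_cases h3 : i = "Rain"
  · subst h3; simp only [auxWeatherBest, auxWeatherRank, List.mem_cons]
    simp only [String.reduceEq, false_or, if_false, true_or, if_true]
    split_ifs <;> omega
  by_cases h4 : i = "Drizzle"
  · subst h4; simp only [auxWeatherBest, auxWeatherRank, List.mem_cons]
    simp only [String.reduceEq, false_or, if_false, true_or, if_true]
    split_ifs <;> omega
  by_cases h5 : i = "Clouds"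
  · subst h5; simp only [auxWeatherBest, auxWeatherRank, List.mem_cons]
    simp only [String.reduceEq, false_or, if_false, true_or, if_true]
    split_ifs <;> omega
  by_cases h6 : i = "Clear"
  · subst h6; simp only [auxWeatherBest, auxWeatherRank, List.mem_cons]
    simp only [String.reduceEq, false_or, if_false, true_or, if_true]
    split_ifs <;> omega
  · have n1 : ¬ ("Thunderstorm" = i) := fun h => h1 h.symm
    have n2 : ¬ ("Snow" = i) := fun h => h2 h.symm
    have n3 : ¬ ("Rain" = i) := fun h => h3 h.symm
    have n4 : ¬ ("Drizzle" = i) := fun h => h4 h.symm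
    have n5 : ¬ ("Clouds" = i) := fun h => h5 h.symm
    have n6 : ¬ ("Clear" = i) := fun h => h6 h.symm
    simp only [auxWeatherBest, auxWeatherRank, List.mem_cons,
      h1, h2, h3, h4, h5, h6, n1, n2, n3, n4, n5, n6, if_false, false_or]
    split_ifs <;> omega

theorem fold_eq_best (l : List String) :
    l.foldl (fun best i => min (auxWeatherRank i) best) 6 = auxWeatherBest l := by
  induction l with
  | nil => simp [auxWeatherBest]
  | cons i rest ih =>
    simp only [List.foldl]
    rw [foldl_min_shift, ih, best_cons]

-- ===== VERDICT (by name: the statement is the Claim_ definition above) =====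
theorem auxWeather_spec : Claim_equal_auxWeather := by
  intro l _
  unfold Spec_auxWeather auxWeather auxWeather_alt
  simp only [auxWeatherStep_min, fold_eq_best, auxWeatherScan_eq, auxWeatherBest]
  by_cases h1 : ("Thunderstorm" : String) ∈ l <;>
  by_cases h2 : ("Snow" : String) ∈ l <;>
  by_cases h3 : ("Rain" : String) ∈ l <;>
  by_cases h4 : ("Drizzle" : String) ∈ l <;>
  by_cases h5 : ("Clouds" : String) ∈ l <;>
  by_cases h6 : ("Clear" : String) ∈ l <;>
  simp [h1, h2, h3, h4, h5, h6, auxWeatherMsgs]
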